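-- pv_equiv track=rewrite | github.com/Thinknoon/python_book | cofocal_selenium_ver2.py | get_tracks_Uniform
-- ===== SOURCE A (Python) =====
-- def get_tracks_Uniform(distance):
--     v=25
--     tracks=[]
--     current=0
--     while current+v < distance:
--         tracks.append(v)
--         current+=v
--     tracks.append(distance-current)
--     return tracks
-- ===== SOURCE B (Python) =====
-- def get_tracks_Uniform(distance):
--     # closed form: k full 25-steps, then the remainder; k = max(0, ceil(distance/25) - 1)
--     k = max(0, -((-distance) // 25) - 1)
--     return [25] * k + [distance - 25 * k]
-- ===== Notes on version B (the rewrite author's own statement) =====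
-- stated objective: simpler
-- what changed: Replaces the accumulation while-loop with a closed-form count k = max(0, ceil(distance/25)-1) of full 25-steps and builds [25]*k + [distance-25*k] directly.
import Mathlib
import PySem

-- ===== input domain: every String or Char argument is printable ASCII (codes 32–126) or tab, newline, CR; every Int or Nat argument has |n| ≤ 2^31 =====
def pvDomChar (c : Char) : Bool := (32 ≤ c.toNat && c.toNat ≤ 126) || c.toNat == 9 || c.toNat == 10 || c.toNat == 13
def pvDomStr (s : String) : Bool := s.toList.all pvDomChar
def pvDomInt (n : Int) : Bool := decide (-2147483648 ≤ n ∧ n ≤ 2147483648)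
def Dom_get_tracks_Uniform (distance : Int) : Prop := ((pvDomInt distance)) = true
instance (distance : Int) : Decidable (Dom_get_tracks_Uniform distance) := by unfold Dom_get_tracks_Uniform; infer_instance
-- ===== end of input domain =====

-- B replaces A's accumulation loop with a closed-form step count (simpler; same results).

-- ===== PORT A =====
-- the while loop of A: state (current, tracks)
def get_tracks_Uniform_loop (distance : Int) (current : Int) (tracks : List Int) : List Int :=
  if current + 25 < distance then
    get_tracks_Uniform_loop distance (current + 25) (tracks ++ [25])
  else
    tracks ++ [distance - current]
termination_by (distance - current).toNat
decreasing_by omega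

def get_tracks_Uniform (distance : Int) : List Int :=
  get_tracks_Uniform_loop distance 0 []

-- ===== PORT B =====
def get_tracks_Uniform_alt (distance : Int) : List Int :=
  let k : Int := max 0 (-(PySem.Int.floordiv (-distance) 25) - 1)
  List.replicate k.toNat 25 ++ [distance - 25 * k]

-- ===== PRECONDITION & SPEC =====
def Spec_get_tracks_Uniform (distance : Int) (out : List Int) : Prop := out = get_tracks_Uniform_alt distance
instance (distance : Int) (out : List Int) : Decidable (Spec_get_tracks_Uniform distance out) := by unfold Spec_get_tracks_Uniform; infer_instance

-- ===== CLAIM (what is proved, stated in full; the proofs are below) =====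
def Claim_equal_get_tracks_Uniform : Prop := ∀ (distance : Int), Dom_get_tracks_Uniform distance → Spec_get_tracks_Uniform distance (get_tracks_Uniform distance)

-- ===== LEMMAS AND PROOFS =====

-- ceiling division by 25, characterised
def pvCeil25 (x : Int) : Int := -(PySem.Int.floordiv (-x) 25)

lemma pvCeil25_bounds (x : Int) : (pvCeil25 x - 1) * 25 < x ∧ x ≤ pvCeil25 x * 25 :=
  (PySem.Int.neg_floordiv_neg_eq_iff_of_pos (a := x) (b := 25) (q := pvCeil25 x) (by norm_num)).mp rfl

def pvK (x : Int) : Int := max 0 (pvCeil25 x - 1)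

lemma pvK_le (x : Int) (h : x ≤ 25) : pvK x = 0 := by
  have hb := pvCeil25_bounds x
  unfold pvK; omega

lemma pvK_gt (x : Int) (h : 25 < x) : pvK x = pvK (x - 25) + 1 := by
  have hb := pvCeil25_bounds x
  have hb' := pvCeil25_bounds (x - 25)
  unfold pvK; omega

-- the loop computes, appended to its accumulator, the closed-form list for x = distance - current
lemma loop_closed (n : Nat) : ∀ (d c : Int) (t : List Int), (d - c).toNat ≤ n →
    get_tracks_Uniform_loop d c t
      = t ++ (List.replicate (pvK (d - c)).toNat 25 ++ [d - c - 25 * pvK (d - c)]) := by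
  induction n with
  | zero =>
    intro d c t h
    rw [get_tracks_Uniform_loop]
    have hle : d - c ≤ 25 := by omega
    rw [pvK_le _ hle]
    simp
    omega
  | succ n ih =>
    intro d c t h
    rw [get_tracks_Uniform_loop]
    by_cases hc : c + 25 < d
    · have hx : 25 < d - c := by omega
      rw [if_pos hc, ih d (c + 25) (t ++ [25]) (by omega)]
      rw [pvK_gt _ hx]
      have hk0 : 0 ≤ pvK (d - c - 25) := le_max_left _ _
      have : (pvK (d - c - 25) + 1).toNat = (pvK (d - c - 25)).toNat + 1 := by omega
      rw [this, List.replicate_succ]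
      have harg : d - (c + 25) = d - c - 25 := by ring
      rw [harg]
      simp
      ring
    · rw [if_neg hc]
      have hle : d - c ≤ 25 := by omega
      rw [pvK_le _ hle]
      simp

-- ===== VERDICT (by name: the statement is the Claim_ definition above) =====
theorem get_tracks_Uniform_spec : Claim_equal_get_tracks_Uniform := by
  intro d _
  unfold Spec_get_tracks_Uniform get_tracks_Uniform get_tracks_Uniform_alt
  rw [loop_closed (d - 0).toNat d 0 [] (by omega)]
  simp [pvK, pvCeil25]
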